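-- pv_equiv track=rewrite | github.com/kittilsenstian-debug/the-hand | theory-tools/huckel_golden_ratio_research.py | fib_poly
-- ===== SOURCE A (Python) =====
-- def fib_poly(n):
--     """Return coefficients of n-th Fibonacci polynomial (list, highest power first)."""
--     if n == 1:
--         return [1]  # F_1 = 1
--     elif n == 2:
--         return [1, 0]  # F_2 = x
--     else:
--         # F_n(x) = x * F_{n-1}(x) - F_{n-2}(x)
--         prev2 = fib_poly(n - 2)
--         prev1 = fib_poly(n - 1)
--         # x * prev1
--         xp = prev1 + [0]  # multiply by x = shift coefficients
--         # pad prev2 to same length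
--         diff = len(xp) - len(prev2)
--         prev2_padded = [0] * diff + prev2
--         return [a - b for a, b in zip(xp, prev2_padded)]
-- ===== SOURCE B (Python) =====
-- def fib_poly(n):
--     """Return coefficients of n-th Fibonacci polynomial (list, highest power first).
--
--     Bottom-up iteration of the two-term recurrence instead of naive double recursion.
--     """
--     if n < 1:
--         raise ValueError("n must be a positive integer")
--     if n == 1:
--         return [1]
--     cur, nxt = [1], [1, 0]
--     for _ in range(n - 2):
--         cur, nxt = nxt, [x - y for x, y in zip(nxt + [0], [0, 0] + cur)]
--     return nxt
-- ===== Notes on version B (the rewrite author's own statement) =====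
-- stated objective: faster
-- what changed: replaces the naive top-down double recursion (exponentially many recomputed subcalls) by one bottom-up loop keeping only the last two coefficient lists; intended as faster (asymptotic), a timing run measured B 6.59x at the largest size A still finished (A times out beyond n around 16)
-- outside the precondition, e.g. on fib_poly(0): A raises RecursionError, B raises ValueError
import Mathlib
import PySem

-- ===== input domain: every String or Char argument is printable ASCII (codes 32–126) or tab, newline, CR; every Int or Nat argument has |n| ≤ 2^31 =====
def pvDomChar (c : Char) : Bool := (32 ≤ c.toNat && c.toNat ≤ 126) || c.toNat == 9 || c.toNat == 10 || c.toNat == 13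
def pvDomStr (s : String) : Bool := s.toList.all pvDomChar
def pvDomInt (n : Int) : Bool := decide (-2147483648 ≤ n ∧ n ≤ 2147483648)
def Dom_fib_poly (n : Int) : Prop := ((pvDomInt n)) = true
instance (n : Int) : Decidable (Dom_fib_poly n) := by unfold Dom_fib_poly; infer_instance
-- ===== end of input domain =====

-- B replaces A's exponential top-down double recursion by one bottom-up loop over the
-- two-term recurrence (objective: faster — intended asymptotic; a timing run measured
-- B 6.59x at the largest size A still finished). Pre_ restricts to n >= 1: for n <= 0 both
-- programs raise (A RecursionError, B ValueError).


-- ===== PORT A =====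
def fib_poly (n : Int) : List Int :=
  if n = 1 then [1]
  else if n = 2 then [1, 0]
  else if n ≤ 2 then []  -- Python recurses forever here (RecursionError); excluded by Pre_
  else
    let prev2 := fib_poly (n - 2)
    let prev1 := fib_poly (n - 1)
    let xp := prev1 ++ [0]
    let diff : Int := (xp.length : Int) - (prev2.length : Int)
    let prev2_padded := List.replicate diff.toNat 0 ++ prev2
    List.zipWith (fun a b => a - b) xp prev2_padded
termination_by n.toNat
decreasing_by all_goals omega

-- ===== PORT B =====
def fib_poly_alt (n : Int) : List Int :=
  if n < 1 then []  -- Python B raises ValueError here; outside Pre_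
  else if n = 1 then [1]
  else
    ((List.range (n - 2).toNat).foldl
      (fun (st : List Int × List Int) _ =>
        (st.2, List.zipWith (fun x y => x - y) (st.2 ++ [0]) ([0, 0] ++ st.1)))
      ([1], [1, 0])).2

-- ===== PRECONDITION & SPEC =====
-- Pre_ excludes n ≤ 0, where Python A never returns (infinite recursion).
def Pre_fib_poly (n : Int) : Prop := 1 ≤ n
instance (n : Int) : Decidable (Pre_fib_poly n) := by unfold Pre_fib_poly; infer_instance
def pvWitness_fib_poly : Int := (3)
def Spec_fib_poly (n : Int) (out : List Int) : Prop := out = fib_poly_alt n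
instance (n : Int) (out : List Int) : Decidable (Spec_fib_poly n out) := by unfold Spec_fib_poly; infer_instance

-- ===== CLAIM (what is proved, stated in full; the proofs are below) =====
def Claim_equal_fib_poly : Prop := ∀ (n : Int), Dom_fib_poly n → Pre_fib_poly n → Spec_fib_poly n (fib_poly n)

-- ===== LEMMAS AND PROOFS =====

theorem fib_poly_one : fib_poly 1 = [1] := by rw [fib_poly]; norm_num

theorem fib_poly_two : fib_poly 2 = [1, 0] := by rw [fib_poly]; norm_num

-- length of A's result is n, for n ≥ 1 (stated over Nat offsets)
theorem fib_poly_length : ∀ (k : Nat), (fib_poly ((k : Int) + 1)).length = k + 1 := by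
  intro k
  induction k using Nat.strong_induction_on with
  | _ k ih =>
    match k with
    | 0 => rw [show ((0 : Nat) : Int) + 1 = 1 by norm_num, fib_poly_one]; rfl
    | 1 => rw [show ((1 : Nat) : Int) + 1 = 2 by norm_num, fib_poly_two]; rfl
    | (m + 2) =>
      rw [fib_poly]
      have hn : ((m + 2 : Nat) : Int) + 1 = (m : Int) + 3 := by push_cast; ring
      rw [hn]
      rw [if_neg (by omega : ¬ ((m : Int) + 3 = 1)),
          if_neg (by omega : ¬ ((m : Int) + 3 = 2)),
          if_neg (by omega : ¬ ((m : Int) + 3 ≤ 2))]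
      rw [show (m : Int) + 3 - 1 = ((m + 1 : Nat) : Int) + 1 by push_cast; ring,
          show (m : Int) + 3 - 2 = ((m : Nat) : Int) + 1 by ring]
      have l1 := ih (m + 1) (by omega)
      have l2 := ih m (by omega)
      simp only [List.length_zipWith, List.length_append, List.length_replicate, l1, l2]
      simp only [List.length_cons, List.length_nil]
      omega

-- A's recurrence in the exact shape of B's loop body
theorem fib_poly_step : ∀ (k : Nat),
    fib_poly ((k : Int) + 3) =
      List.zipWith (fun x y => x - y) (fib_poly ((k : Int) + 2) ++ [0])
        ([0, 0] ++ fib_poly ((k : Int) + 1)) := by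
  intro k
  rw [fib_poly]
  rw [if_neg (by omega : ¬ ((k : Int) + 3 = 1)),
      if_neg (by omega : ¬ ((k : Int) + 3 = 2)),
      if_neg (by omega : ¬ ((k : Int) + 3 ≤ 2))]
  rw [show (k : Int) + 3 - 1 = (k : Int) + 2 by ring,
      show (k : Int) + 3 - 2 = (k : Int) + 1 by ring]
  have l1 : (fib_poly ((k : Int) + 2)).length = k + 2 := by
    have h := fib_poly_length (k + 1)
    rw [show ((k + 1 : Nat) : Int) + 1 = (k : Int) + 2 by push_cast; ring] at h
    omega
  have l2 : (fib_poly ((k : Int) + 1)).length = k + 1 := fib_poly_length k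
  have hd : ((((fib_poly ((k : Int) + 2)) ++ [0]).length : Int) -
      ((fib_poly ((k : Int) + 1)).length : Int)).toNat = 2 := by
    simp only [List.length_append, l1, l2]
    simp only [List.length_cons, List.length_nil]
    omega
  dsimp only
  rw [hd]
  rfl

-- loop invariant: after k iterations the state is (F_{k+1}, F_{k+2})
theorem fib_poly_loop : ∀ (k : Nat),
    (List.range k).foldl
      (fun (st : List Int × List Int) _ =>
        (st.2, List.zipWith (fun x y => x - y) (st.2 ++ [0]) ([0, 0] ++ st.1)))
      ([1], [1, 0]) =
    (fib_poly ((k : Int) + 1), fib_poly ((k : Int) + 2)) := by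
  intro k
  induction k with
  | zero =>
    rw [show ((0 : Nat) : Int) + 1 = 1 by norm_num, show ((0 : Nat) : Int) + 2 = 2 by norm_num,
        fib_poly_one, fib_poly_two]
    rfl
  | succ m ih =>
    rw [List.range_succ, List.foldl_append, ih]
    simp only [List.foldl_cons, List.foldl_nil]
    have hs := fib_poly_step m
    rw [show ((m + 1 : Nat) : Int) + 1 = (m : Int) + 2 by push_cast; ring,
        show ((m + 1 : Nat) : Int) + 2 = (m : Int) + 3 by push_cast; ring, hs]

-- ===== VERDICT (by name: the statement is the Claim_ definition above) =====
theorem fib_poly_spec : Claim_equal_fib_poly := by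
  intro n _ hpre
  unfold Spec_fib_poly fib_poly_alt
  rw [if_neg (by unfold Pre_fib_poly at hpre; omega : ¬ n < 1)]
  by_cases h1 : n = 1
  · subst h1; rw [if_pos rfl]; exact fib_poly_one
  · rw [if_neg h1]
    have hk : ∃ k : Nat, n = (k : Int) + 2 := by
      refine ⟨(n - 2).toNat, ?_⟩
      unfold Pre_fib_poly at hpre
      omega
    obtain ⟨k, rfl⟩ := hk
    rw [show ((k : Int) + 2 - 2).toNat = k by omega, fib_poly_loop]
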